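-- pv_equiv track=rewrite | github.com/NidalZabade/AI_Project1 | src/dashboard.py | get_max_consecutive_bricks
-- ===== SOURCE A (Python) =====
-- def get_max_consecutive_bricks(board, player):
--     max_consecutive_bricks = 0
--     current_consecutive_bricks = 0
--
--     for i in range(len(board)):
--         if board[i] == player:
--             current_consecutive_bricks += 1
--         else:
--             max_consecutive_bricks = max(
--                 max_consecutive_bricks, current_consecutive_bricks
--             )
--             current_consecutive_bricks = 0
--
--     max_consecutive_bricks = max(max_consecutive_bricks, current_consecutive_bricks)
--
--     return max_consecutive_bricks
-- ===== SOURCE B (Python) =====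
-- def get_max_consecutive_bricks(board, player):
--     # Decompose the board into maximal runs of equal adjacent cells first,
--     # then reduce over the runs belonging to the player.
--     runs = []  # (key, length) of each maximal run
--     i, n = 0, len(board)
--     while i < n:
--         j = i
--         while j < n and board[j] == board[i]:
--             j += 1
--         runs.append((board[i], j - i))
--         i = j
--     best = 0
--     for k, ln in runs:
--         if k == player:
--             best = max(best, ln)
--     return best
-- ===== Notes on version B (the rewrite author's own statement) =====
-- stated objective: alternative
-- what changed: B first partitions the board into maximal runs of equal adjacent cells (a groupby pass) and then takes the max length over the runs whose key is the player, instead of maintaining a running counter per element as A does.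
import Mathlib
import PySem

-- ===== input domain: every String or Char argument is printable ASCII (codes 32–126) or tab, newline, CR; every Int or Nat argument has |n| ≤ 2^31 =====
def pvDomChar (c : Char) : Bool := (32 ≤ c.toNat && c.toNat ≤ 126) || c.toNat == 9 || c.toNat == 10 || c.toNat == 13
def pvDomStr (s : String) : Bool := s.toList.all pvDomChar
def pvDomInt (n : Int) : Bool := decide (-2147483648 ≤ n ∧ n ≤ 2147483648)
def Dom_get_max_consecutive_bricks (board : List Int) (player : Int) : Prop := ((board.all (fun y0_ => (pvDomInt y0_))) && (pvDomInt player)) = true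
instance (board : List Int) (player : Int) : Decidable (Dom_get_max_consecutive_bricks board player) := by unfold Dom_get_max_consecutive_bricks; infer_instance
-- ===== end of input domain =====

-- B decomposes the board into maximal runs of equal adjacent cells and maxes over the player's run lengths; A keeps a running counter per element. Same O(n) cost; objective: alternative decomposition.

-- ===== PORT A =====
def get_max_consecutive_bricks (board : List Int) (player : Int) : Int :=
  let s := board.foldl
    (fun (p : Int × Int) x => if x = player then (p.1, p.2 + 1) else (max p.1 p.2, 0))
    ((0 : Int), (0 : Int))
  max s.1 s.2

-- ===== PORT B =====
-- the (key, length) list of maximal runs of equal adjacent elements (Source B's outer while loop)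
def pvRuns : List Int → List (Int × Int)
  | [] => []
  | x :: xs =>
    (x, ((xs.takeWhile (fun y => y == x)).length : Int) + 1)
      :: pvRuns (xs.dropWhile (fun y => y == x))
termination_by l => l.length
decreasing_by
  simp only [List.length_cons]
  exact Nat.lt_succ_of_le (List.length_dropWhile_le _ _)

def get_max_consecutive_bricks_alt (board : List Int) (player : Int) : Int :=
  (pvRuns board).foldl (fun best p => if p.1 = player then max best p.2 else best) 0

-- ===== PRECONDITION & SPEC =====
def Spec_get_max_consecutive_bricks (board : List Int) (player : Int) (out : Int) : Prop := out = get_max_consecutive_bricks_alt board player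
instance (board : List Int) (player : Int) (out : Int) : Decidable (Spec_get_max_consecutive_bricks board player out) := by unfold Spec_get_max_consecutive_bricks; infer_instance

-- ===== CLAIM (what is proved, stated in full; the proofs are below) =====
def Claim_equal_get_max_consecutive_bricks : Prop := ∀ (board : List Int) (player : Int), Dom_get_max_consecutive_bricks board player → Spec_get_max_consecutive_bricks board player (get_max_consecutive_bricks board player)

-- ===== LEMMAS AND PROOFS =====

-- A's fold with explicit start state (m, c)
def pvFA (player : Int) (board : List Int) (m c : Int) : Int :=
  let s := board.foldl
    (fun (p : Int × Int) x => if x = player then (p.1, p.2 + 1) else (max p.1 p.2, 0))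
    (m, c)
  max s.1 s.2

def pvFB (player : Int) (best : Int) (p : Int × Int) : Int :=
  if p.1 = player then max best p.2 else best

def pvLead (player : Int) (board : List Int) : Int :=
  ((board.takeWhile (fun y => y == player)).length : Int)

def pvRem (player : Int) (board : List Int) : List Int :=
  board.dropWhile (fun y => y == player)

lemma pvFA_nil (player m c : Int) : pvFA player [] m c = max m c := rfl

lemma pvFA_cons (player x m c : Int) (xs : List Int) :
    pvFA player (x :: xs) m c =
      if x = player then pvFA player xs m (c + 1) else pvFA player xs (max m c) 0 := by
  by_cases h : x = player <;> simp [pvFA, List.foldl, h]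

lemma pvAlt_eq (board : List Int) (player : Int) :
    get_max_consecutive_bricks_alt board player = (pvRuns board).foldl (pvFB player) 0 := rfl

-- m passes through A's fold only via max
lemma pvFA_linear (player : Int) (board : List Int) :
    ∀ m c : Int, 0 ≤ c → pvFA player board m c = max m (pvFA player board 0 c) := by
  induction board with
  | nil => intro m c hc; simp [pvFA_nil]; omega
  | cons x xs ih =>
    intro m c hc
    rw [pvFA_cons, pvFA_cons]
    by_cases h : x = player
    · rw [if_pos h, if_pos h]; exact ih m (c + 1) (by omega)
    · simp only [if_neg h]
      rw [ih (max m c) 0 le_rfl, ih (max 0 c) 0 le_rfl]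
      omega

lemma pvFB_foldl_le (player : Int) : ∀ (gs : List (Int × Int)) (a : Int), a ≤ gs.foldl (pvFB player) a := by
  intro gs
  induction gs with
  | nil => intro a; simp
  | cons g gs ih =>
    intro a
    refine le_trans ?_ (ih (pvFB player a g))
    unfold pvFB; split <;> omega

lemma pvFB_linear (player : Int) : ∀ (gs : List (Int × Int)) (a : Int), 0 ≤ a →
    gs.foldl (pvFB player) a = max a (gs.foldl (pvFB player) 0) := by
  intro gs
  induction gs with
  | nil => intro a ha; simp; omega
  | cons g gs ih =>
    intro a ha
    simp only [List.foldl_cons]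
    by_cases h : g.1 = player
    · rw [show pvFB player a g = max a g.2 by simp [pvFB, h],
          show pvFB player 0 g = max 0 g.2 by simp [pvFB, h],
          ih (max a g.2) (by omega), ih (max 0 g.2) (by omega)]
      omega
    · rw [show pvFB player a g = a by simp [pvFB, h],
          show pvFB player 0 g = 0 by simp [pvFB, h]]
      exact ih a ha

-- a non-player head cell is absorbed into the same run decomposition
lemma pvAlt_skip (player x : Int) (h : x ≠ player) (xs : List Int) :
    (pvRuns (x :: xs)).foldl (pvFB player) 0 = (pvRuns xs).foldl (pvFB player) 0 := by
  rw [pvRuns]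
  simp only [List.foldl_cons]
  rw [show pvFB player 0 (x, ((xs.takeWhile (fun y => y == x)).length : Int) + 1) = 0 by
    simp [pvFB, h]]
  cases xs with
  | nil => simp [pvRuns]
  | cons y ys =>
    by_cases hyx : y = x
    · subst hyx
      rw [pvRuns]
      simp only [List.foldl_cons]
      rw [show pvFB player 0 (y, ((ys.takeWhile (fun z => z == y)).length : Int) + 1) = 0 by
        simp [pvFB, h]]
      rw [show List.dropWhile (fun z => z == y) (y :: ys) = List.dropWhile (fun z => z == y) ys by
        simp]
    · rw [show List.dropWhile (fun z => z == x) (y :: ys) = y :: ys by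
        simp [hyx]]

-- peel the leading player run off B's result
lemma pvAlt_lead (player : Int) (r : List Int) :
    (pvRuns r).foldl (pvFB player) 0 =
      max (pvLead player r) ((pvRuns (pvRem player r)).foldl (pvFB player) 0) := by
  cases r with
  | nil => simp [pvRuns, pvLead, pvRem]
  | cons y ys =>
    by_cases hy : y = player
    · subst hy
      rw [pvRuns]
      simp only [List.foldl_cons]
      rw [show pvFB y 0 (y, ((ys.takeWhile (fun z => z == y)).length : Int) + 1)
            = max 0 (((ys.takeWhile (fun z => z == y)).length : Int) + 1) by simp [pvFB]]
      rw [pvFB_linear y _ _ (by omega)]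
      rw [show pvLead y (y :: ys) = ((ys.takeWhile (fun z => z == y)).length : Int) + 1 by
        simp [pvLead]]
      rw [show pvRem y (y :: ys) = ys.dropWhile (fun z => z == y) by
        simp [pvRem]]
      omega
    · rw [show pvLead player (y :: ys) = 0 by
        simp [pvLead, hy]]
      rw [show pvRem player (y :: ys) = y :: ys by
        simp [pvRem, hy]]
      have := pvFB_foldl_le player (pvRuns (y :: ys)) 0
      omega

-- main invariant: c is the length of the player run in progress
lemma pvMain (player : Int) (board : List Int) :
    ∀ c : Int, 0 ≤ c →
      pvFA player board 0 c =
        max (c + pvLead player board) ((pvRuns (pvRem player board)).foldl (pvFB player) 0) := by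
  induction board with
  | nil =>
    intro c hc
    simp [pvFA_nil, pvRuns, pvLead, pvRem]
    omega
  | cons x xs ih =>
    intro c hc
    rw [pvFA_cons]
    by_cases h : x = player
    · subst h
      rw [if_pos rfl, ih (c + 1) (by omega)]
      rw [show pvLead x (x :: xs) = pvLead x xs + 1 by
        simp [pvLead]]
      rw [show pvRem x (x :: xs) = pvRem x xs by
        simp [pvRem]]
      omega
    · simp only [if_neg h]
      rw [pvFA_linear player xs (max 0 c) 0 le_rfl, ih 0 le_rfl]
      rw [show pvLead player (x :: xs) = 0 by
        simp [pvLead, h]]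
      rw [show pvRem player (x :: xs) = x :: xs by
        simp [pvRem, h]]
      rw [pvAlt_skip player x h xs, pvAlt_lead player xs]
      omega

-- ===== VERDICT (by name: the statement is the Claim_ definition above) =====
theorem get_max_consecutive_bricks_spec : Claim_equal_get_max_consecutive_bricks := by
  intro board player _
  unfold Spec_get_max_consecutive_bricks
  have hA : get_max_consecutive_bricks board player = pvFA player board 0 0 := rfl
  rw [hA, pvMain player board 0 le_rfl, pvAlt_eq, pvAlt_lead player board]
  omega
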